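-- pv_equiv track=rewrite | github.com/SpikingNeurons/toolcraft | toolcraft/util.py | _generate_descriptors_for_group_tasks
-- ===== SOURCE A (Python) =====
-- import typing as t
--
-- def _generate_descriptors_for_group_tasks(
--     _items: t.Dict[str, t.Any]
-- ) -> t.Dict[str, str]:
--
--     _num_items = len(_items)
--     _max_key_len = max([len(_) for _ in _items.keys()])
--     _descriptors = {
--         _: f"{i+1:0{len(str(_num_items))}d}/{_num_items} > {_}"
--         for i, _ in enumerate(_items.keys())
--     }
--     _max_desc_len = max([len(_) for _ in _descriptors.values()])
--     _descriptors = {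
--         k: v.ljust(_max_desc_len, ' ')
--         for k, v in _descriptors.items()
--     }
--     return _descriptors
-- ===== SOURCE B (Python) =====
-- def _generate_descriptors_for_group_tasks(_items):
--     _num_items = len(_items)
--     _w = len(str(_num_items))
--     # every descriptor is exactly 2*_w + 4 + len(key) chars long, so the target
--     # padding width is known in closed form before any descriptor is built
--     _pad = 2 * _w + 4 + max(len(_) for _ in _items)
--     return {
--         _: f"{i+1:0{_w}d}/{_num_items} > {_}".ljust(_pad, ' ')
--         for i, _ in enumerate(_items)
--     }
-- ===== Notes on version B (the rewrite author's own statement) =====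
-- stated objective: simpler
-- what changed: Replaces A's three passes (build descriptors, rescan for the max descriptor length, rebuild with padding) by a single comprehension that pads each descriptor to a closed-form width 2*len(str(n))+4+max_key_len computed up front.
import Mathlib
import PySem

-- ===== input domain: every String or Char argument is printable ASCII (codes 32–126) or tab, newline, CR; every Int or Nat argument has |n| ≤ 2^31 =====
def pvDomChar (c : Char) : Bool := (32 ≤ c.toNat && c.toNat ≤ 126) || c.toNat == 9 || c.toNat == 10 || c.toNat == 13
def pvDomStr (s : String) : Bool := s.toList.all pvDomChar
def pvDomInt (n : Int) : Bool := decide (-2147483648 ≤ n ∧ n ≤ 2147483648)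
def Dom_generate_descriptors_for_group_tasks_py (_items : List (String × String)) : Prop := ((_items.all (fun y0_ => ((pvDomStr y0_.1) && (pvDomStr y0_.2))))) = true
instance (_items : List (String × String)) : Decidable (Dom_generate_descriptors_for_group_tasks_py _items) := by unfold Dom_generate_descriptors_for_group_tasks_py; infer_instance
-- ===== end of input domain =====

-- B replaces A's three passes (build descriptors, rescan for the max length, re-pad)
-- by one comprehension padding each descriptor to a closed-form width; same cost, simpler.


-- s.ljust(w, ' '): pad on the right with spaces up to width w (exact: no pad when w ≤ len(s))
def pvLjust (cs : List Char) (w : Int) : List Char :=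
  cs ++ List.replicate (w.toNat - cs.length) ' '

-- ===== PORT A =====
def generate_descriptors_for_group_tasks_py (_items : List (String × String)) : List (String × String) :=
  let _num_items : Int := PySem.List.len _items
  -- max([...]) raises ValueError on an empty dict: Pre_ excludes []; the value is unused (as in A)
  let _max_key_len : Int := (PySem.List.max? (_items.map (fun p => PySem.Str.len p.1)) (fun x => x)).getD 0
  let ns : List Char := PySem.Int.toChars _num_items
  -- dict comprehension over enumerate(keys): the keys of a dict are distinct, so a map in order is exact;
  -- f"{i+1:0{W}d}" on the nonnegative i+1 is zero-padding to width W = PySem.Chars.zfill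
  let _descriptors : List (String × String) :=
    ((_items.map Prod.fst).zipIdx).map (fun z =>
      (z.1, String.ofList (PySem.Chars.zfill (PySem.Int.toChars ((z.2 : Int) + 1)) ((ns.length : Int))
                       ++ '/' :: ns ++ ' ' :: '>' :: ' ' :: z.1.toList)))
  let _max_desc_len : Int := (PySem.List.max? (_descriptors.map (fun p => PySem.Str.len p.2)) (fun x => x)).getD 0
  _descriptors.map (fun kv => (kv.1, String.ofList (pvLjust kv.2.toList _max_desc_len)))

-- ===== PORT B =====
def generate_descriptors_for_group_tasks_py_alt (_items : List (String × String)) : List (String × String) :=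
  let _num_items : Int := PySem.List.len _items
  let ns : List Char := PySem.Int.toChars _num_items
  let _w : Int := (ns.length : Int)
  -- max(...) raises ValueError on an empty dict: Pre_ excludes []
  let _pad : Int := 2 * _w + 4 + (PySem.List.max? (_items.map (fun p => PySem.Str.len p.1)) (fun x => x)).getD 0
  ((_items.map Prod.fst).zipIdx).map (fun z =>
    (z.1, String.ofList (pvLjust (PySem.Chars.zfill (PySem.Int.toChars ((z.2 : Int) + 1)) _w
                              ++ '/' :: ns ++ ' ' :: '>' :: ' ' :: z.1.toList) _pad)))

-- ===== PRECONDITION & SPEC =====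
-- A (and B) raise ValueError (max() of an empty sequence) on the empty dict; Pre_ excludes exactly that.
def Pre_generate_descriptors_for_group_tasks_py (_items : List (String × String)) : Prop := _items ≠ []
instance (_items : List (String × String)) : Decidable (Pre_generate_descriptors_for_group_tasks_py _items) := by unfold Pre_generate_descriptors_for_group_tasks_py; infer_instance
def pvWitness_generate_descriptors_for_group_tasks_py : (List (String × String)) := [("a", "x")]

def Spec_generate_descriptors_for_group_tasks_py (_items : List (String × String)) (out : List (String × String)) : Prop := out = generate_descriptors_for_group_tasks_py_alt _items
instance (_items : List (String × String)) (out : List (String × String)) : Decidable (Spec_generate_descriptors_for_group_tasks_py _items out) := by unfold Spec_generate_descriptors_for_group_tasks_py; infer_instance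

-- ===== CLAIM (what is proved, stated in full; the proofs are below) =====
def Claim_equal_generate_descriptors_for_group_tasks_py : Prop := ∀ (_items : List (String × String)), Dom_generate_descriptors_for_group_tasks_py _items → Pre_generate_descriptors_for_group_tasks_py _items → Spec_generate_descriptors_for_group_tasks_py _items (generate_descriptors_for_group_tasks_py _items)

-- ===== LEMMAS AND PROOFS =====

-- n < 10 ^ (number of decimal digits of n), for the core digit printer with enough fuel
lemma pv_toDigitsCore_self_lt : ∀ (f n : Nat), n < f → n < 10 ^ (Nat.toDigitsCore 10 f n []).length := by
  intro f
  induction f with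
  | zero => intro n h; omega
  | succ f ih =>
    intro n h
    by_cases hx : n / 10 = 0
    · have hrw : Nat.toDigitsCore 10 (f + 1) n [] = [(n % 10).digitChar] := by
        simp [Nat.toDigitsCore, hx]
      rw [hrw]
      simpa using by omega
    · have hrw : (Nat.toDigitsCore 10 (f + 1) n []).length
          = (Nat.toDigitsCore 10 f (n / 10) []).length + 1 := by
        simp [Nat.toDigitsCore, hx, Nat.toDigitsCore_lens_eq]
      rw [hrw]
      have h2 := ih (n / 10) (by omega)
      set L := (Nat.toDigitsCore 10 f (n / 10) []).length with hL
      calc n < 10 * 10 ^ L := by omega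
        _ = 10 ^ (L + 1) := by ring

lemma pv_lt_pow_toDigits_length (n : Nat) : n < 10 ^ (Nat.toDigits 10 n).length :=
  pv_toDigitsCore_self_lt (n + 1) n (Nat.lt_succ_self n)

-- decimal length is monotone: m ≤ n → len(str(m)) ≤ len(str(n))
lemma pv_toDigits_length_mono {m n : Nat} (h : m ≤ n) :
    (Nat.toDigits 10 m).length ≤ (Nat.toDigits 10 n).length := by
  have hn := pv_lt_pow_toDigits_length n
  have hpos : 0 < (Nat.toDigits 10 n).length := by
    by_cases h0 : n = 0
    · subst h0; decide
    · rcases Nat.eq_zero_or_pos (Nat.toDigits 10 n).length with hz | hp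
      · rw [hz] at hn; simp at hn; omega
      · exact hp
  exact Nat.toDigits_length 10 m _ hpos (by omega)

-- zero-padding str(i+1) (with 1 ≤ i+1 ≤ n) to the width of str(n) yields exactly that width
lemma pv_zfill_len {i n : Nat} (h : i < n) :
    (PySem.Chars.zfill (PySem.Int.toChars ((i : Int) + 1)) (((Nat.toDigits 10 n).length : Int))).length
      = (Nat.toDigits 10 n).length := by
  have he : PySem.Int.toChars ((i : Int) + 1) = Nat.toDigits 10 (i + 1) := by
    have hc : ((i : Int) + 1) = ((i + 1 : Nat) : Int) := by push_cast; ring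
    rw [hc]
    simp only [PySem.Int.toChars]
    rw [if_neg (by omega)]
    simp
  rw [PySem.Chars.length_zfill, he]
  have hm := pv_toDigits_length_mono (show i + 1 ≤ n by omega)
  simp
  omega

-- foldl max commutes with adding a constant
lemma pv_foldl_max_add (c : Int) : ∀ (t : List Int) (x : Int),
    (t.map (fun y => c + y)).foldl max (c + x) = c + t.foldl max x := by
  intro t
  induction t with
  | nil => intro x; simp
  | cons y t ih =>
    intro x
    simp only [List.map_cons, List.foldl_cons]
    rw [max_add_add_left, ih]

-- max over a nonempty list shifted by a constant
lemma pv_max_map_add (c : Int) (x : Int) (t : List Int) :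
    ((PySem.List.max? ((x :: t).map (fun y => c + y)) (fun y => y)).getD 0)
      = c + ((PySem.List.max? (x :: t) (fun y => y)).getD 0) := by
  simp only [List.map_cons, PySem.List.max?_id_cons, Option.getD_some]
  exact pv_foldl_max_add c t x

-- ===== VERDICT (by name: the statement is the Claim_ definition above) =====
theorem generate_descriptors_for_group_tasks_py_spec : Claim_equal_generate_descriptors_for_group_tasks_py := by
  intro _items _hDom hPre
  unfold Spec_generate_descriptors_for_group_tasks_py
  unfold Pre_generate_descriptors_for_group_tasks_py at hPre
  unfold generate_descriptors_for_group_tasks_py generate_descriptors_for_group_tasks_py_alt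
  have hns : PySem.Int.toChars (PySem.List.len _items) = Nat.toDigits 10 _items.length := by
    simp [PySem.List.len, PySem.Int.toChars]
  simp only [hns, List.map_map]
  have hlist :
      List.map
        ((fun p => PySem.Str.len p.2) ∘ fun z =>
          (z.1,
            String.ofList
              (PySem.Chars.zfill (PySem.Int.toChars ((z.2 : Int) + 1))
                    ((Nat.toDigits 10 _items.length).length : Int) ++
                  '/' :: Nat.toDigits 10 _items.length ++
                ' ' :: '>' :: ' ' :: z.1.toList)))
        (List.map Prod.fst _items).zipIdx
      = (List.map (fun p => PySem.Str.len p.1) _items).map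
          (fun y => (2 * ((Nat.toDigits 10 _items.length).length : Int) + 4) + y) := by
    have hpt : ∀ z ∈ (List.map Prod.fst _items).zipIdx,
        ((fun p => PySem.Str.len p.2) ∘ fun z =>
          (z.1,
            String.ofList
              (PySem.Chars.zfill (PySem.Int.toChars ((z.2 : Int) + 1))
                    ((Nat.toDigits 10 _items.length).length : Int) ++
                  '/' :: Nat.toDigits 10 _items.length ++
                ' ' :: '>' :: ' ' :: z.1.toList))) z
        = ((fun k : String => (2 * ((Nat.toDigits 10 _items.length).length : Int) + 4) + (k.toList.length : Int)) ∘ Prod.fst) z := by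
      intro z hz
      obtain ⟨x, i⟩ := z
      have hi : i < _items.length := by
        have := (List.mem_zipIdx' hz).1
        simpa using this
      simp only [Function.comp_apply, PySem.Str.len, String.toList_ofList,
        List.length_append, List.length_cons, pv_zfill_len hi]
      push_cast
      ring
    rw [List.map_congr_left hpt]
    rw [show ((fun k : String => (2 * ((Nat.toDigits 10 _items.length).length : Int) + 4) + (k.toList.length : Int)) ∘ Prod.fst)
          = ((fun y => (2 * ((Nat.toDigits 10 _items.length).length : Int) + 4) + y) ∘ (fun k : String => (k.toList.length : Int)) ∘ Prod.fst) from rfl]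
    rw [← List.map_map, ← List.map_map, List.zipIdx_map_fst, List.map_map, List.map_map]
    simp [PySem.Str.len]
  rw [hlist]
  obtain ⟨p, rest, rfl⟩ : ∃ p rest, _items = p :: rest := by
    cases _items with
    | nil => exact absurd rfl hPre
    | cons p rest => exact ⟨p, rest, rfl⟩
  rw [List.map_cons, pv_max_map_add]
  simp only [Function.comp_def, String.toList_ofList]
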